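-- pv_equiv track=rewrite | github.com/kingport/attendance-salary | rules/base.py | count_sundays
-- ===== SOURCE A (Python) =====
-- def count_sundays(year: int, month: int) -> int:
--     """计算指定月份的周日天数"""
--     import calendar
--     count = 0
--     _, days_in_month = calendar.monthrange(year, month)
--     for day in range(1, days_in_month + 1):
--         if calendar.weekday(year, month, day) == 6:  # 6 = Sunday
--             count += 1
--     return count
--
-- def days_in_month(year: int, month: int) -> int:
--     """返回指定月份的总天数"""
--     import calendar
--     return calendar.monthrange(year, month)[1]
-- ===== SOURCE B (Python) =====
-- def count_sundays(year: int, month: int) -> int: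
--     """计算指定月份的周日天数"""
--     leap = year % 4 == 0 and (year % 100 != 0 or year % 400 == 0)
--     lengths = [31, 29 if leap else 28, 31, 30, 31, 30, 31, 31, 30, 31, 30, 31]
--     offsets = [0, 31, 59, 90, 120, 151, 181, 212, 243, 273, 304, 334]
--     num_days = lengths[month - 1]
--     before = offsets[month - 1] + (1 if leap and month > 2 else 0)
--     y = year - 1
--     first_wd = (y + y // 4 - y // 100 + y // 400 + before) % 7  # weekday of the 1st, Mon=0..Sun=6
--     first_sunday = 1 + (6 - first_wd) % 7                       # day of month of the first Sunday
--     return (num_days - first_sunday) // 7 + 1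
-- ===== Notes on version B (the rewrite author's own statement) =====
-- stated objective: simpler
-- what changed: Replaced the per-day loop (one calendar.weekday call per day of the month) by a closed-form computation: literal month-length/offset tables, the standard y+y//4-y//100+y//400 weekday formula for the 1st, the day of the first Sunday, and (num_days - first_sunday)//7 + 1.
import Mathlib
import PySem

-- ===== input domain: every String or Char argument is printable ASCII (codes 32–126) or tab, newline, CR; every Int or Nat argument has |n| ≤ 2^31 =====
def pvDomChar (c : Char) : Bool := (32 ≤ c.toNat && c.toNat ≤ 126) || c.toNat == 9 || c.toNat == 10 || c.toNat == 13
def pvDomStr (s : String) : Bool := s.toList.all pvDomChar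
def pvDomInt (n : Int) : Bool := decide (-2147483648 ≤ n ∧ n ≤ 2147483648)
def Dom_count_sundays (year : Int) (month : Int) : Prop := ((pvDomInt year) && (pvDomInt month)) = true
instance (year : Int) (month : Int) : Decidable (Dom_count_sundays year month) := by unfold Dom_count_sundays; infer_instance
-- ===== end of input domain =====

-- B replaces A's per-day loop (one calendar.weekday call per day of the month) by a
-- closed-form count: literal month-length/offset tables, the standard proleptic-Gregorian
-- weekday formula for the 1st, the date of the first Sunday, and
-- (num_days - first_sunday)//7 + 1 (objective: simpler).

-- ===== PORT A =====
-- Ports of the CPython library calls A makes (calendar.isleap / monthrange / weekday,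
-- via the day-ordinal formula): exact for every year and 1 ≤ month ≤ 12 (calendar.weekday
-- normalizes the year mod 400; the ordinal formula is periodic mod 400 modulo 7, so they agree).
def pvIsLeap (y : Int) : Bool := y % 4 == 0 && (y % 100 != 0 || y % 400 == 0)

def pvDaysInMonth (y m : Int) : Int :=
  if m == 2 then (if pvIsLeap y then 29 else 28)
  else if m == 4 || m == 6 || m == 9 || m == 11 then 30
  else 31

def pvDaysBeforeYear (y : Int) : Int :=
  (y - 1) * 365 + PySem.Int.floordiv (y - 1) 4 - PySem.Int.floordiv (y - 1) 100
    + PySem.Int.floordiv (y - 1) 400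

def pvDaysBeforeMonth (y m : Int) : Int :=
  (PySem.List.pyRange 1 m 1).foldl (fun acc k => acc + pvDaysInMonth y k) 0

-- date(y, m, d).weekday(): Monday = 0 … Sunday = 6
def pvWeekday (y m d : Int) : Int :=
  (pvDaysBeforeYear y + pvDaysBeforeMonth y m + d + 6) % 7

def count_sundays (year : Int) (month : Int) : Int :=
  let days_in_month := pvDaysInMonth year month
  (PySem.List.pyRange 1 (days_in_month + 1) 1).foldl
    (fun count day => if pvWeekday year month day == 6 then count + 1 else count) 0

-- ===== PORT B =====
-- Transliteration of Source B: no per-day loop and no calendar model shared with A — literal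
-- month tables (indexed with pyGet?; the none/IndexError case is excluded by Pre_), the
-- standard weekday formula for the 1st, and the first Sunday's date.
def count_sundays_alt (year : Int) (month : Int) : Int :=
  let leap := PySem.Int.mod year 4 == 0 &&
    (PySem.Int.mod year 100 != 0 || PySem.Int.mod year 400 == 0)
  let lengths : List Int := [31, if leap then 29 else 28, 31, 30, 31, 30, 31, 31, 30, 31, 30, 31]
  let offsets : List Int := [0, 31, 59, 90, 120, 151, 181, 212, 243, 273, 304, 334]
  let num_days := (PySem.List.pyGet? lengths (month - 1)).getD 0
  let before := (PySem.List.pyGet? offsets (month - 1)).getD 0 +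
    (if leap && decide (2 < month) then 1 else 0)
  let y := year - 1
  let first_wd := PySem.Int.mod
    (y + PySem.Int.floordiv y 4 - PySem.Int.floordiv y 100 + PySem.Int.floordiv y 400 + before) 7
  let first_sunday := 1 + PySem.Int.mod (6 - first_wd) 7
  PySem.Int.floordiv (num_days - first_sunday) 7 + 1

-- ===== PRECONDITION & SPEC =====
-- Exactly where Python A returns: calendar.monthrange raises IllegalMonthError for month
-- outside 1..12 (calendar.weekday normalizes any year, so the year is unrestricted).
def Pre_count_sundays (year : Int) (month : Int) : Prop :=
  1 ≤ month ∧ month ≤ 12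
instance (year : Int) (month : Int) : Decidable (Pre_count_sundays year month) := by
  unfold Pre_count_sundays; infer_instance

def pvWitness_count_sundays : Int × Int := (2024, 3)

def Spec_count_sundays (year : Int) (month : Int) (out : Int) : Prop := out = count_sundays_alt year month
instance (year : Int) (month : Int) (out : Int) : Decidable (Spec_count_sundays year month out) := by unfold Spec_count_sundays; infer_instance

-- ===== CLAIM (what is proved, stated in full; the proofs are below) =====
def Claim_equal_count_sundays : Prop := ∀ (year : Int) (month : Int), Dom_count_sundays year month → Pre_count_sundays year month → Spec_count_sundays year month (count_sundays year month)

-- ===== LEMMAS AND PROOFS =====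

-- weekday is an arithmetic progression mod 7 in the day of month
theorem pvWeekday_shift (y m d : Int) :
    pvWeekday y m d = (pvWeekday y m 1 + d - 1) % 7 := by
  unfold pvWeekday
  omega

-- the generic loop of A, abstracted over the first day's weekday and the month length
def pvLoop (w n : Int) : Int :=
  (PySem.List.pyRange 1 (n + 1) 1).foldl
    (fun count day => if (w + day - 1) % 7 == 6 then count + 1 else count) 0

-- closed form of the loop in B's shape: the first Sunday is day 1 + (6 - w) % 7, and
-- every 7th day after it is another Sunday
theorem pvLoop_closed (w n : Int) (hw0 : 0 ≤ w) (hw7 : w < 7)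
    (hn : n = 28 ∨ n = 29 ∨ n = 30 ∨ n = 31) :
    pvLoop w n = PySem.Int.floordiv (n - (1 + PySem.Int.mod (6 - w) 7)) 7 + 1 := by
  interval_cases w <;> rcases hn with rfl | rfl | rfl | rfl <;> decide

theorem pvDaysInMonth_cases (y m : Int) :
    pvDaysInMonth y m = 28 ∨ pvDaysInMonth y m = 29 ∨
    pvDaysInMonth y m = 30 ∨ pvDaysInMonth y m = 31 := by
  unfold pvDaysInMonth
  split_ifs <;> simp

theorem pvWeekday_bounds (y m d : Int) : 0 ≤ pvWeekday y m d ∧ pvWeekday y m d < 7 := by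
  unfold pvWeekday
  omega

theorem count_sundays_eq_loop (year month : Int) :
    count_sundays year month = pvLoop (pvWeekday year month 1) (pvDaysInMonth year month) := by
  unfold count_sundays pvLoop
  exact List.foldl_ext _ _ 0 (fun count day _ => by rw [pvWeekday_shift])

-- B's month-length table lookup agrees with the CPython month-length helper
theorem table_days (year month : Int) (h1 : 1 ≤ month) (h12 : month ≤ 12) :
    (PySem.List.pyGet?
      [31, if PySem.Int.mod year 4 == 0 &&
              (PySem.Int.mod year 100 != 0 || PySem.Int.mod year 400 == 0) then (29:Int) else 28,
       31, 30, 31, 30, 31, 31, 30, 31, 30, 31] (month - 1)).getD 0 =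
    pvDaysInMonth year month := by
  unfold pvDaysInMonth pvIsLeap
  interval_cases month <;>
    simp only [PySem.Int.mod_eq_emod_of_pos (by norm_num : (0:Int) < 4),
      PySem.Int.mod_eq_emod_of_pos (by norm_num : (0:Int) < 100),
      PySem.Int.mod_eq_emod_of_pos (by norm_num : (0:Int) < 400)] <;>
    norm_num [PySem.List.pyGet?, PySem.List.pyIdx?] <;>
    (try split_ifs) <;> rfl

-- B's weekday formula for the 1st of the month equals the port of calendar.weekday there
theorem ordinal_weekday (year month : Int) (h1 : 1 ≤ month) (h12 : month ≤ 12) :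
    pvWeekday year month 1 =
    PySem.Int.mod ((year - 1) + PySem.Int.floordiv (year - 1) 4
        - PySem.Int.floordiv (year - 1) 100 + PySem.Int.floordiv (year - 1) 400
        + ((PySem.List.pyGet? [(0:Int), 31, 59, 90, 120, 151, 181, 212, 243, 273, 304, 334]
              (month - 1)).getD 0 +
           (if (PySem.Int.mod year 4 == 0 &&
                 (PySem.Int.mod year 100 != 0 || PySem.Int.mod year 400 == 0)) &&
                decide (2 < month) then 1 else 0))) 7 := by
  unfold pvWeekday pvDaysBeforeYear pvDaysBeforeMonth pvDaysInMonth pvIsLeap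
  interval_cases month <;>
    simp only [PySem.Int.mod_eq_emod_of_pos (by norm_num : (0:Int) < 4),
      PySem.Int.mod_eq_emod_of_pos (by norm_num : (0:Int) < 7),
      PySem.Int.mod_eq_emod_of_pos (by norm_num : (0:Int) < 100),
      PySem.Int.mod_eq_emod_of_pos (by norm_num : (0:Int) < 400),
      PySem.Int.floordiv_eq_ediv_of_pos (by norm_num : (0:Int) < 4),
      PySem.Int.floordiv_eq_ediv_of_pos (by norm_num : (0:Int) < 100),
      PySem.Int.floordiv_eq_ediv_of_pos (by norm_num : (0:Int) < 400),
      beq_iff_eq] <;>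
    norm_num [PySem.List.pyRange_one_cons, PySem.List.pyRange_one_eq_nil,
      PySem.List.pyGet?, PySem.List.pyIdx?, List.foldl] <;>
    (try split_ifs) <;> (try simp only [show Int.toNat 2 = 2 from rfl, show Int.toNat 3 = 3 from rfl,
      show Int.toNat 4 = 4 from rfl, show Int.toNat 5 = 5 from rfl, show Int.toNat 6 = 6 from rfl,
      show Int.toNat 7 = 7 from rfl, show Int.toNat 8 = 8 from rfl, show Int.toNat 9 = 9 from rfl,
      show Int.toNat 10 = 10 from rfl, show Int.toNat 11 = 11 from rfl,
      List.getElem_cons_succ, List.getElem_cons_zero]) <;> omega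

-- ===== VERDICT (by name: the statement is the Claim_ definition above) =====
theorem count_sundays_spec : Claim_equal_count_sundays := by
  intro year month _ hpre
  unfold Spec_count_sundays
  obtain ⟨h1, h12⟩ := hpre
  have hb := pvWeekday_bounds year month 1
  rw [count_sundays_eq_loop,
    pvLoop_closed _ _ hb.1 hb.2 (pvDaysInMonth_cases year month)]
  show _ = count_sundays_alt year month
  unfold count_sundays_alt
  simp only []
  rw [table_days year month h1 h12, ← ordinal_weekday year month h1 h12]
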